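/- GENERATED by farm/mkstatement.py from design/units.tsv (unit `digest_map.E`) and the assertions of Gif/Spec/Seg_digest_map.lean — do not edit.
   THE STATEMENT of the proof unit `digest_map.E`: segment E of `digest_map` (7 instructions; entries 0x105558;
   exits ret; ranges 0x105558-0x105564)
   takes each of its entry assertions to one of its exit assertions (`Gif.Spec.digest_map.SegE`), given the contracts of its callees.
   What the names mean: ProgX/Base/Spec/Basic.lean (the shared hypotheses), Gif/Spec/Seg_digest_map.lean (the assertions). The theorem to prove:
   `theorem digest_map_E_ok : Gif.Spec.digest_map_E.Statement`. -/
import Gif.Code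
import Gif.Dec.All
import Gif.Labels
import Gif.Spec.Seg_digest_map
namespace Gif.Spec.digest_map_E
open X86 X86.User Asan

/-- The statement of unit `digest_map.E`. -/
def Statement : Prop :=
  ∀ (Lay : Layout) (_hLay : Lay.hi = 0x1000000) (μ : Microarch) (_hμ : UserX.MicroOK μ) (u₀ : State)
    (_hcode : HasCodeNat Lay u₀ Gif.L.digest_map.entry Gif.Code.code_digest_map.nat Gif.L.digest_map.size),
    Gif.Spec.digest_map.SegE Lay μ u₀

end Gif.Spec.digest_map_E
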